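-- pv_equiv track=rewrite | github.com/HunkWhoCodes/CodeSignalSolutions | Intro/11-isLucky.py | solution
-- ===== SOURCE A (Python) =====
-- def solution(n):
--     length = get_length(n)
--     sum1 = sum2 = 0
--     first_half = second_half = length // 2
--
--     while second_half:
--         sum2 += n % 10
--         n = n // 10
--         second_half -= 1
--
--     while first_half:
--         sum1 += n % 10
--         n = n // 10
--         first_half -= 1
--
--     return sum1 == sum2
--
-- def get_length(n):
--     length = 0
--     while n:
--         n = n // 10
--         length += 1
--
--     return length
-- ===== SOURCE B (Python) =====
-- def solution(n):
--     digits = []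
--     while n:
--         digits.append(n % 10)
--         n //= 10
--     half = len(digits) // 2
--     return sum(digits[:half]) == sum(digits[half:2*half])
-- ===== Notes on version B (the rewrite author's own statement) =====
-- stated objective: simpler
-- what changed: Materialize all digits in one pass into a list, then compare sums of two slices, replacing the separate get_length helper and the two arithmetic peel loops.
import Mathlib
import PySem

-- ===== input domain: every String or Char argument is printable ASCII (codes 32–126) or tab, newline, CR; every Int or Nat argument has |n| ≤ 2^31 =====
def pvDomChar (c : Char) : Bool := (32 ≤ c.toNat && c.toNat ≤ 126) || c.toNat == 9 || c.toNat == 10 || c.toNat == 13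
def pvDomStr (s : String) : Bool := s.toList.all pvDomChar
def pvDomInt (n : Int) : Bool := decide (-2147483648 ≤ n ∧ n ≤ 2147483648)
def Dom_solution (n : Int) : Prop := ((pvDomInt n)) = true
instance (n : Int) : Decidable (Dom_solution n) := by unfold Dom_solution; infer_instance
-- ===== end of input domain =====

-- B replaces A's get_length helper and two arithmetic peel loops by one digit-extraction
-- pass into a list followed by comparing the sums of two slices (objective: simpler).

-- termination helper for the digit loops (cited by decreasing_by)
theorem pvFloordivTen_toNat_lt (n : Int) (h : 0 < n) :
    (PySem.Int.floordiv n 10).toNat < n.toNat := by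
  rw [PySem.Int.floordiv_eq_ediv_of_pos (by omega)]; omega

-- ===== PORT A =====
-- get_length: 'while n: n //= 10; length += 1'. The guard '0 < n' (not 'n ≠ 0') only
-- makes the port total: on negative n the Python loop never terminates (excluded by Pre_).
def lenLoop (n acc : Int) : Int :=
  if 0 < n then lenLoop (PySem.Int.floordiv n 10) (acc + 1) else acc
termination_by n.toNat
decreasing_by exact pvFloordivTen_toNat_lt n (by assumption)

-- one peel loop 'while cnt: s += n % 10; n //= 10; cnt -= 1' (cnt is always ≥ 0 here)
def peelLoop (cnt n s : Int) : Int × Int :=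
  if 0 < cnt then peelLoop (cnt - 1) (PySem.Int.floordiv n 10) (s + PySem.Int.mod n 10)
  else (n, s)
termination_by cnt.toNat
decreasing_by omega

def solution (n : Int) : Bool :=
  let length := lenLoop n 0
  let half := PySem.Int.floordiv length 2
  let p2 := peelLoop half n 0        -- (n after first loop, sum2)
  let p1 := peelLoop half p2.1 0     -- (_, sum1)
  p1.2 == p2.2

-- ===== PORT B =====
-- 'digits = []; while n: digits.append(n % 10); n //= 10' (low-order digit first);
-- same totality guard '0 < n' as in port A (negatives never terminate in Python).
def digitsLoop (n : Int) : List Int :=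
  if 0 < n then PySem.Int.mod n 10 :: digitsLoop (PySem.Int.floordiv n 10) else []
termination_by n.toNat
decreasing_by exact pvFloordivTen_toNat_lt n (by assumption)

def solution_alt (n : Int) : Bool :=
  let digits := digitsLoop n
  let half := digits.length / 2
  -- digits[:half] and digits[half:2*half] with 0 ≤ half, 2*half ≤ len
  (digits.take half).sum == ((digits.drop half).take half).sum

-- ===== PRECONDITION & SPEC =====
-- Pre_ excludes n < 0: there both Python programs loop forever (n // 10 stays negative),
-- so A returns no value on the excluded inputs.
def Pre_solution (n : Int) : Prop := 0 ≤ n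
instance (n : Int) : Decidable (Pre_solution n) := by unfold Pre_solution; infer_instance
def pvWitness_solution : Int := (1230)

def Spec_solution (n : Int) (out : Bool) : Prop := out = solution_alt n
instance (n : Int) (out : Bool) : Decidable (Spec_solution n out) := by unfold Spec_solution; infer_instance

-- ===== CLAIM (what is proved, stated in full; the proofs are below) =====
def Claim_equal_solution : Prop := ∀ (n : Int), Dom_solution n → Pre_solution n → Spec_solution n (solution n)

-- ===== LEMMAS AND PROOFS =====

theorem floordivTen_nonneg (n : Int) (h : 0 ≤ n) : 0 ≤ PySem.Int.floordiv n 10 := by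
  rw [PySem.Int.floordiv_eq_ediv_of_pos (by omega)]; omega

-- proof-only iterated-division and partial-digit-sum functions
def divIter : Nat → Int → Int
  | 0, n => n
  | k + 1, n => divIter k (PySem.Int.floordiv n 10)

def msum : Nat → Int → Int
  | 0, _ => 0
  | k + 1, n => PySem.Int.mod n 10 + msum k (PySem.Int.floordiv n 10)

theorem divIter_nonneg (k : Nat) (n : Int) (h : 0 ≤ n) : 0 ≤ divIter k n := by
  induction k generalizing n with
  | zero => exact h
  | succ k ih => exact ih _ (floordivTen_nonneg n h)

theorem lenLoop_eq (n acc : Int) : lenLoop n acc = acc + ((digitsLoop n).length : Int) := by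
  fun_induction lenLoop n acc with
  | case1 n acc h ih =>
      rw [digitsLoop]; simp only [h, if_pos]
      rw [ih]; simp only [List.length_cons]; push_cast; ring
  | case2 n acc h =>
      rw [digitsLoop]; simp [h]

theorem peelLoop_eq (k : Nat) (n s : Int) :
    peelLoop (k : Int) n s = (divIter k n, s + msum k n) := by
  induction k generalizing n s with
  | zero => rw [peelLoop]; simp [divIter, msum]
  | succ k ih =>
      rw [peelLoop]
      have h : (0 : Int) < ((k + 1 : Nat) : Int) := by positivity
      simp only [h, if_pos]
      have hc : ((k + 1 : Nat) : Int) - 1 = (k : Int) := by push_cast; ring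
      rw [hc, ih]
      simp [divIter, msum]; ring

theorem msum_take (k : Nat) (n : Int) (hn : 0 ≤ n) (hk : k ≤ (digitsLoop n).length) :
    msum k n = ((digitsLoop n).take k).sum ∧ digitsLoop (divIter k n) = (digitsLoop n).drop k := by
  induction k generalizing n with
  | zero => simp [msum, divIter]
  | succ k ih =>
      have hpos : 0 < n := by
        by_contra hneg
        have : digitsLoop n = [] := by rw [digitsLoop]; simp [hneg]
        rw [this] at hk; simp at hk
      have hd : digitsLoop n = PySem.Int.mod n 10 :: digitsLoop (PySem.Int.floordiv n 10) := by
        rw [digitsLoop]; simp [hpos]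
      have hk' : k ≤ (digitsLoop (PySem.Int.floordiv n 10)).length := by
        rw [hd] at hk; simpa using hk
      obtain ⟨ih1, ih2⟩ := ih (PySem.Int.floordiv n 10) (floordivTen_nonneg n (le_of_lt hpos)) hk'
      constructor
      · rw [hd]; simp only [msum, List.take_succ_cons, List.sum_cons, ih1]
      · rw [hd]; simpa [divIter] using ih2

theorem beq_comm_int (a b : Int) : (a == b) = (b == a) := by
  by_cases h : a = b
  · simp [h]
  · simp [h, Ne.symm h]

-- ===== VERDICT (by name: the statement is the Claim_ definition above) =====
theorem solution_spec : Claim_equal_solution := by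
  intro n _hdom hpre
  unfold Spec_solution solution solution_alt
  have hlen : lenLoop n 0 = ((digitsLoop n).length : Int) := by
    rw [lenLoop_eq]; ring
  set d := digitsLoop n with hd
  set half := d.length / 2 with hhalf
  have hcast : PySem.Int.floordiv ((d.length : Int)) 2 = (half : Int) := by
    exact_mod_cast PySem.Int.floordiv_natCast d.length 2
  have hk1 : half ≤ d.length := Nat.div_le_self _ _
  have h1 := peelLoop_eq half n 0
  obtain ⟨hs2, hdrop⟩ := msum_take half n hpre (by simpa [← hd] using hk1)
  have hn1 : 0 ≤ divIter half n := divIter_nonneg half n hpre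
  have hk2 : half ≤ (digitsLoop (divIter half n)).length := by
    rw [hdrop, ← hd]; simp; omega
  obtain ⟨hs1, _⟩ := msum_take half (divIter half n) hn1 hk2
  simp only [hlen, hcast, h1]
  rw [peelLoop_eq half (divIter half n) 0]
  simp only [zero_add, hs1, hs2, hdrop, ← hd, ← hhalf]
  exact beq_comm_int _ _
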